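-- pv_equiv track=rewrite | github.com/Zrealshadow/TabDiT | inference/utils.py | generate_repaint_schedule
-- ===== SOURCE A (Python) =====
-- from typing import List, Tuple, Optional
--
-- def generate_repaint_schedule(
--     num_timesteps: int,
--     jump_length: int = 10,
--     jump_n_sample: int = 10,
-- ) -> List[Tuple[int, int]]:
--     """
--     Generate RePaint schedule with resampling jumps.
--
--     The schedule includes:
--     - Normal denoising steps: t -> t-1
--     - Jump forward steps: t -> t+jump_length (resampling)
--
--     At certain timesteps, we jump forward and denoise again multiple times
--     to improve harmony between known and unknown regions.
--
--     Args:
--         num_timesteps: Total number of diffusion timesteps (T)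
--         jump_length: Number of steps to jump forward for resampling
--         jump_n_sample: Number of times to resample at each jump point
--
--     Returns:
--         List of (t_prev, t_cur) tuples representing the schedule.
--         If t_cur < t_prev: denoise step
--         If t_cur > t_prev: resample (add noise) step
--
--     Example:
--         For num_timesteps=100, jump_length=10, jump_n_sample=2:
--         At t=90: [(99,90), (90,100), (100,90), (90,100), (100,90)]
--                   denoise   jump     denoise   jump     denoise
--     """
--     schedule = []
--     t = num_timesteps - 1  # Start from T-1
--
--     while t >= 0:
--         # Determine if this is a jump point
--         # Jump points are at t = 0, jump_length, 2*jump_length, ...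
--         is_jump_point = (t % jump_length == 0) and (t > 0)
--
--         if is_jump_point and jump_n_sample > 1:
--             # At jump points, we do multiple resample cycles
--             for _ in range(jump_n_sample - 1):
--                 # Denoise from current to t - jump_length
--                 for step in range(jump_length):
--                     if t - step > 0:
--                         schedule.append((t - step, t - step - 1))
--
--                 # Jump forward (add noise back)
--                 # Go from (t - jump_length) back to t
--                 for step in range(jump_length):
--                     if t - jump_length + step < t:
--                         schedule.append((t - jump_length + step, t - jump_length + step + 1))
--
--         # Normal denoising step
--         if t > 0:
--             schedule.append((t, t - 1))
--
--         t -= 1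
--
--     return schedule
-- ===== SOURCE B (Python) =====
-- def generate_repaint_schedule(num_timesteps, jump_length=10, jump_n_sample=10):
--     # Build the walk of visited timestep positions, then zip consecutive positions.
--     positions = [num_timesteps - 1] if num_timesteps >= 1 else []
--     for t in range(num_timesteps - 1, 0, -1):
--         if t % jump_length == 0 and jump_n_sample > 1:
--             for _ in range(jump_n_sample - 1):
--                 positions.extend(range(t - 1, t - jump_length - 1, -1))
--                 positions.extend(range(t - jump_length + 1, t + 1))
--         positions.append(t - 1)
--     return list(zip(positions, positions[1:]))
-- ===== Notes on version B (the rewrite author's own statement) =====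
-- stated objective: simpler
-- what changed: B replaces A's four separate tuple-appending loops by building the flat walk of visited timestep positions (seed, jump blocks as two ranges, normal step) and zipping the walk with its tail to obtain the (t_prev, t_cur) pairs.
import Mathlib
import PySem

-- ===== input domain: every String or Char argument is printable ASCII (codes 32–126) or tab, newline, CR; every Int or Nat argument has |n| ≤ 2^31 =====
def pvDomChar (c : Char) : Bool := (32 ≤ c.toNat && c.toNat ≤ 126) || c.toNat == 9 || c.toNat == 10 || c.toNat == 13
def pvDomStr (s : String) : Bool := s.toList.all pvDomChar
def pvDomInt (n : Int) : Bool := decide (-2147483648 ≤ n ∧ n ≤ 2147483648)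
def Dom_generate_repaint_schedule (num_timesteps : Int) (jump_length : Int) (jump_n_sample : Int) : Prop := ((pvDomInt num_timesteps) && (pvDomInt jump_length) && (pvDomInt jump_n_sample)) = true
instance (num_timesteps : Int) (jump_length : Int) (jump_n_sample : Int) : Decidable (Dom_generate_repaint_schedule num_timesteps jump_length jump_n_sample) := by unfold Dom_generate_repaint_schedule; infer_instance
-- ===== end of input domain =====

-- B builds the flat walk of visited timestep positions and zips consecutive positions,
-- instead of A's per-case tuple appends (objective: simpler decomposition, same cost).

-- ===== PORT A =====
-- one iteration of A's while-loop body (t fixed)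
def genA_step (jl jns t : Int) (sched : List (Int × Int)) : List (Int × Int) :=
  let is_jump : Bool := (PySem.Int.mod t jl == 0) && decide (0 < t)
  let sched :=
    if is_jump && decide (1 < jns) then
      (PySem.List.pyRange 0 (jns - 1) 1).foldl (fun s _ =>
        let s := (PySem.List.pyRange 0 jl 1).foldl
          (fun s step => if 0 < t - step then s ++ [(t - step, t - step - 1)] else s) s
        (PySem.List.pyRange 0 jl 1).foldl
          (fun s step => if t - jl + step < t then s ++ [(t - jl + step, t - jl + step + 1)] else s) s) sched
    else sched
  if 0 < t then sched ++ [(t, t - 1)] else sched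

-- A's while-loop: t counts down from num_timesteps-1 while t ≥ 0; fuel bounds the iterations
def genA_loop (jl jns : Int) : Nat → Int → List (Int × Int) → List (Int × Int)
  | 0, _, sched => sched
  | fuel + 1, t, sched =>
      if 0 ≤ t then genA_loop jl jns fuel (t - 1) (genA_step jl jns t sched)
      else sched

def generate_repaint_schedule (num_timesteps : Int) (jump_length : Int) (jump_n_sample : Int) : List (Int × Int) :=
  genA_loop jump_length jump_n_sample num_timesteps.toNat (num_timesteps - 1) []

-- ===== PORT B =====
def genB_positions (num_timesteps jl jns : Int) : List Int :=
  let X : List Int := if 1 ≤ num_timesteps then [num_timesteps - 1] else []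
  (PySem.List.pyRange (num_timesteps - 1) 0 (-1)).foldl (fun X t =>
    (if (PySem.Int.mod t jl == 0) && decide (1 < jns) then
        (PySem.List.pyRange 0 (jns - 1) 1).foldl (fun X _ =>
          X ++ PySem.List.pyRange (t - 1) (t - jl - 1) (-1)
            ++ PySem.List.pyRange (t - jl + 1) (t + 1) 1) X
      else X) ++ [t - 1]) X

def generate_repaint_schedule_alt (num_timesteps : Int) (jump_length : Int) (jump_n_sample : Int) : List (Int × Int) :=
  let X := genB_positions num_timesteps jump_length jump_n_sample
  X.zip (X.drop 1)   -- zip(X, X[1:]) ; X[1:] on a list is exactly List.drop 1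

-- ===== PRECONDITION & SPEC =====
-- Pre_ excludes exactly the inputs where A raises ZeroDivisionError: jump_length = 0 with at
-- least one loop iteration (num_timesteps ≥ 1), where 't % jump_length' is evaluated.
def Pre_generate_repaint_schedule (num_timesteps : Int) (jump_length : Int) (jump_n_sample : Int) : Prop :=
  jump_length ≠ 0 ∨ num_timesteps ≤ 0
instance (num_timesteps : Int) (jump_length : Int) (jump_n_sample : Int) : Decidable (Pre_generate_repaint_schedule num_timesteps jump_length jump_n_sample) := by unfold Pre_generate_repaint_schedule; infer_instance
def pvWitness_generate_repaint_schedule : Int × Int × Int := (100, 10, 2)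

def Spec_generate_repaint_schedule (num_timesteps : Int) (jump_length : Int) (jump_n_sample : Int) (out : List (Int × Int)) : Prop := out = generate_repaint_schedule_alt num_timesteps jump_length jump_n_sample
instance (num_timesteps : Int) (jump_length : Int) (jump_n_sample : Int) (out : List (Int × Int)) : Decidable (Spec_generate_repaint_schedule num_timesteps jump_length jump_n_sample out) := by unfold Spec_generate_repaint_schedule; infer_instance

-- ===== CLAIM (what is proved, stated in full; the proofs are below) =====
def Claim_equal_generate_repaint_schedule : Prop := ∀ (num_timesteps : Int) (jump_length : Int) (jump_n_sample : Int), Dom_generate_repaint_schedule num_timesteps jump_length jump_n_sample → Pre_generate_repaint_schedule num_timesteps jump_length jump_n_sample → Spec_generate_repaint_schedule num_timesteps jump_length jump_n_sample (generate_repaint_schedule num_timesteps jump_length jump_n_sample)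
-- ===== LEMMAS AND PROOFS =====

-- the pairs of consecutive positions along the walk c :: ys
def walkPairs (c : Int) : List Int → List (Int × Int)
  | [] => []
  | y :: ys => (c, y) :: walkPairs y ys

-- the block of positions B appends for one value of t
def stepB (jl jns t : Int) : List Int :=
  (if (PySem.Int.mod t jl == 0) && decide (1 < jns) then
     (PySem.List.pyRange 0 (jns - 1) 1).flatMap (fun _ =>
        PySem.List.pyRange (t - 1) (t - jl - 1) (-1) ++ PySem.List.pyRange (t - jl + 1) (t + 1) 1)
   else []) ++ [t - 1]

theorem zip_drop_eq_walkPairs (x : Int) (xs : List Int) :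
    (x :: xs).zip ((x :: xs).drop 1) = walkPairs x xs := by
  induction xs generalizing x with
  | nil => rfl
  | cons y ys ih => simpa [walkPairs, List.zip] using ih y

theorem walkPairs_append (c : Int) (ys zs : List Int) :
    walkPairs c (ys ++ zs) = walkPairs c ys ++ walkPairs (ys.getLastD c) zs := by
  induction ys generalizing c with
  | nil => rfl
  | cons y ys ih =>
    simp only [List.cons_append, walkPairs, ih y, List.cons_append]
    cases ys <;> simp [List.getLastD]

theorem walkPairs_desc (n : Nat) (c : Int) :
    walkPairs c ((List.range n).map (fun k : Nat => c - 1 - (k : Int))) =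
      (List.range n).map (fun k : Nat => (c - (k : Int), c - (k : Int) - 1)) := by
  induction n generalizing c with
  | zero => rfl
  | succ m ih =>
    rw [List.range_succ_eq_map]
    simp only [List.map_cons, List.map_map, Nat.cast_zero, sub_zero, walkPairs]
    have h1 : ((fun k : Nat => c - 1 - (k : Int)) ∘ Nat.succ) = fun k : Nat => (c - 1) - 1 - (k : Int) := by
      funext k; simp [Function.comp]; omega
    have h2 : ((fun k : Nat => (c - (k : Int), c - (k : Int) - 1)) ∘ Nat.succ)
        = fun k : Nat => ((c - 1) - (k : Int), (c - 1) - (k : Int) - 1) := by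
      funext k; simp [Function.comp, Prod.ext_iff]; omega
    rw [h1, h2, ih (c - 1)]

theorem walkPairs_asc (n : Nat) (c : Int) :
    walkPairs c ((List.range n).map (fun k : Nat => c + 1 + (k : Int))) =
      (List.range n).map (fun k : Nat => (c + (k : Int), c + (k : Int) + 1)) := by
  induction n generalizing c with
  | zero => rfl
  | succ m ih =>
    rw [List.range_succ_eq_map]
    simp only [List.map_cons, List.map_map, Nat.cast_zero, add_zero, walkPairs]
    have h1 : ((fun k : Nat => c + 1 + (k : Int)) ∘ Nat.succ) = fun k : Nat => (c + 1) + 1 + (k : Int) := by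
      funext k; simp [Function.comp]; omega
    have h2 : ((fun k : Nat => (c + (k : Int), c + (k : Int) + 1)) ∘ Nat.succ)
        = fun k : Nat => ((c + 1) + (k : Int), (c + 1) + (k : Int) + 1) := by
      funext k; simp [Function.comp, Prod.ext_iff]; omega
    rw [h1, h2, ih (c + 1)]

theorem getLastD_range_map (m : Nat) (f : Nat → Int) (c : Int) :
    ((List.range (m + 1)).map f).getLastD c = f m := by
  rw [List.range_succ]; simp

theorem stepB_getLastD (jl jns t c : Int) : (stepB jl jns t).getLastD c = t - 1 := by
  unfold stepB; simp

-- the pairs A appends during one resample cycle at t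
def deltaA (jl t : Int) : List (Int × Int) :=
  (PySem.List.pyRange 0 jl 1).map (fun s => (t - s, t - s - 1)) ++
  (PySem.List.pyRange 0 jl 1).map (fun s => (t - jl + s, t - jl + s + 1))

-- chaining one resample chunk jns-1 times, then the normal step
theorem walkPairs_cycles {α : Type} (t : Int) (chunk : List Int) (delta : List (Int × Int))
    (h1 : walkPairs t chunk = delta) (h2 : chunk.getLastD t = t) (l : List α) :
    walkPairs t (l.flatMap (fun _ => chunk) ++ [t - 1]) = l.flatMap (fun _ => delta) ++ [(t, t - 1)] := by
  induction l with
  | nil => rfl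
  | cons x xs ih =>
    simp only [List.flatMap_cons, List.append_assoc]
    rw [walkPairs_append, h1, h2, ih]

theorem stepA_eq (jl jns t : Int) (hjl : jl ≠ 0) (ht : 1 ≤ t) (sched : List (Int × Int)) :
    genA_step jl jns t sched = sched ++ walkPairs t (stepB jl jns t) := by
  have ht0 : 0 < t := by omega
  have ht' : decide (0 < t) = true := by simp; omega
  simp only [genA_step, stepB, ht', Bool.and_true]
  by_cases hc : ((PySem.Int.mod t jl == 0) && decide (1 < jns)) = true
  · -- jump point with resampling
    have hdvd : jl ∣ t := by
      have hc' := hc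
      rw [Bool.and_eq_true] at hc'
      exact (PySem.Int.mod_eq_zero_iff_dvd t jl).1 (by simpa using hc'.1)
    simp only [hc, if_true, if_pos ht0]
    set r1 := PySem.List.pyRange (t - 1) (t - jl - 1) (-1) with hr1
    set r2 := PySem.List.pyRange (t - jl + 1) (t + 1) 1 with hr2
    have hchunk : walkPairs t (r1 ++ r2) = deltaA jl t ∧ (r1 ++ r2).getLastD t = t := by
      rcases lt_or_gt_of_ne hjl with hneg | hpos
      · have e1 : r1 = [] := PySem.List.pyRange_neg_one_eq_nil (by omega)
        have e2 : r2 = [] := PySem.List.pyRange_one_eq_nil (by omega)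
        have e3 : PySem.List.pyRange 0 jl 1 = [] := PySem.List.pyRange_one_eq_nil (by omega)
        simp [e1, e2, deltaA, e3, walkPairs]
      · have hle : jl ≤ t := Int.le_of_dvd (by omega) hdvd
        obtain ⟨m, hm⟩ : ∃ m : Nat, jl.toNat = m + 1 := ⟨jl.toNat - 1, by omega⟩
        have d1 : t - 1 - (t - jl - 1) = jl := by ring
        have d2 : t + 1 - (t - jl + 1) = jl := by ring
        have e1 : r1 = (List.range jl.toNat).map (fun k : Nat => t - 1 - (k : Int)) := by
          rw [hr1, PySem.List.pyRange_neg_one, d1]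
        have e2 : r2 = (List.range jl.toNat).map (fun k : Nat => t - jl + 1 + (k : Int)) := by
          rw [hr2, PySem.List.pyRange_one, d2]
        have w1 : walkPairs t r1
            = (List.range jl.toNat).map (fun k : Nat => (t - (k : Int), t - (k : Int) - 1)) := by
          rw [e1]; exact walkPairs_desc jl.toNat t
        have l1 : r1.getLastD t = t - jl := by
          rw [e1, hm, getLastD_range_map]; omega
        have w2 : walkPairs (t - jl) r2
            = (List.range jl.toNat).map (fun k : Nat => (t - jl + (k : Int), t - jl + (k : Int) + 1)) := by
          rw [e2]; exact walkPairs_asc jl.toNat (t - jl)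
        have l2 : (r1 ++ r2).getLastD t = t := by
          rw [e2, hm, List.range_succ, List.map_append, List.map_singleton,
              ← List.append_assoc, List.getLastD_concat]
          omega
        refine ⟨?_, l2⟩
        rw [walkPairs_append, w1, l1, w2]
        simp only [deltaA]
        have d3 : jl - 0 = jl := by ring
        have h1 : ((fun s => ((t : Int) - s, t - s - 1)) ∘ fun k : Nat => (0 : Int) + (k : Int))
            = fun k : Nat => (t - (k : Int), t - (k : Int) - 1) := by
          funext k; simp [Function.comp]
        have h2 : ((fun s => ((t : Int) - jl + s, t - jl + s + 1)) ∘ fun k : Nat => (0 : Int) + (k : Int))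
            = fun k : Nat => (t - jl + (k : Int), t - jl + (k : Int) + 1) := by
          funext k; simp [Function.comp]
        rw [PySem.List.pyRange_one, d3, List.map_map, List.map_map, h1, h2]
    have hbody : (fun (s : List (Int × Int)) (_ : Int) =>
          (PySem.List.pyRange 0 jl 1).foldl
            (fun s step => if t - jl + step < t then s ++ [(t - jl + step, t - jl + step + 1)] else s)
            ((PySem.List.pyRange 0 jl 1).foldl
              (fun s step => if 0 < t - step then s ++ [(t - step, t - step - 1)] else s) s))
        = fun (s : List (Int × Int)) (_ : Int) => s ++ deltaA jl t := by
      funext s u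
      rw [PySem.List.foldl_append_ite, PySem.List.foldl_append_ite, List.append_assoc]
      rcases lt_or_gt_of_ne hjl with hneg | hpos
      · have e3 : PySem.List.pyRange 0 jl 1 = [] := PySem.List.pyRange_one_eq_nil (by omega)
        simp [e3, deltaA]
      · have hle : jl ≤ t := Int.le_of_dvd (by omega) hdvd
        have f1 : (PySem.List.pyRange 0 jl 1).filter (fun x => decide (0 < t - x))
            = PySem.List.pyRange 0 jl 1 := by
          apply List.filter_eq_self.2
          intro x hx
          have := (PySem.List.mem_pyRange_one).1 hx
          simp; omega
        have f2 : (PySem.List.pyRange 0 jl 1).filter (fun x => decide (t - jl + x < t))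
            = PySem.List.pyRange 0 jl 1 := by
          apply List.filter_eq_self.2
          intro x hx
          have := (PySem.List.mem_pyRange_one).1 hx
          simp; omega
        rw [f1, f2]
        simp [deltaA]
    rw [hbody, PySem.List.foldl_append_eq_flatMap,
        walkPairs_cycles t (r1 ++ r2) (deltaA jl t) hchunk.1 hchunk.2]
    simp [List.append_assoc]
  · -- not a resampling point: only the normal step
    rw [Bool.not_eq_true] at hc
    simp only [hc, Bool.false_eq_true, if_false]
    rw [if_pos ht0]
    simp [walkPairs]

theorem genB_eq (T jl jns : Int) :
    genB_positions T jl jns =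
      (if 1 ≤ T then [T - 1] else []) ++ (PySem.List.pyRange (T - 1) 0 (-1)).flatMap (stepB jl jns) := by
  simp only [genB_positions]
  have hbody : (fun (X : List Int) (t : Int) =>
        (if (PySem.Int.mod t jl == 0) && decide (1 < jns) then
            (PySem.List.pyRange 0 (jns - 1) 1).foldl (fun X _ =>
              X ++ PySem.List.pyRange (t - 1) (t - jl - 1) (-1)
                ++ PySem.List.pyRange (t - jl + 1) (t + 1) 1) X
          else X) ++ [t - 1])
      = fun (X : List Int) (t : Int) => X ++ stepB jl jns t := by
    funext X t
    simp only [stepB]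
    by_cases hc : ((PySem.Int.mod t jl == 0) && decide (1 < jns)) = true
    · simp only [hc, if_true]
      have : (fun (X : List Int) (_ : Int) =>
            X ++ PySem.List.pyRange (t - 1) (t - jl - 1) (-1)
              ++ PySem.List.pyRange (t - jl + 1) (t + 1) 1)
          = fun (X : List Int) (_ : Int) =>
            X ++ (PySem.List.pyRange (t - 1) (t - jl - 1) (-1)
              ++ PySem.List.pyRange (t - jl + 1) (t + 1) 1) := by
        funext X u; rw [List.append_assoc]
      rw [this, PySem.List.foldl_append_eq_flatMap, List.append_assoc]
    · rw [Bool.not_eq_true] at hc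
      simp [hc]
  rw [hbody, PySem.List.foldl_append_eq_flatMap]

theorem genA_main (jl jns : Int) (hjl : jl ≠ 0) :
    ∀ (n : Nat) (t : Int) (sched : List (Int × Int)), t < (n : Int) →
      genA_loop jl jns n t sched =
        sched ++ walkPairs t ((PySem.List.pyRange t 0 (-1)).flatMap (stepB jl jns)) := by
  intro n
  induction n with
  | zero =>
    intro t sched ht
    rw [PySem.List.pyRange_neg_one_eq_nil (by omega)]
    simp [genA_loop, walkPairs]
  | succ m ih =>
    intro t sched ht
    by_cases h0 : 0 ≤ t
    · rcases eq_or_lt_of_le h0 with h1 | h1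
      · -- t = 0: the step appends nothing and the loop stops next round
        have hstep : genA_step jl jns 0 sched = sched := by
          unfold genA_step; simp
        have hm1 : (0 : Int) - 1 = -1 := by norm_num
        rw [genA_loop, if_pos h0, ← h1, hstep, hm1, ih (-1 : Int) sched (by omega),
            PySem.List.pyRange_neg_one_eq_nil (show (-1 : Int) ≤ 0 by omega),
            PySem.List.pyRange_neg_one_eq_nil (show (0 : Int) ≤ 0 by omega)]
        simp [walkPairs]
      · -- t ≥ 1
        rw [genA_loop, if_pos h0, stepA_eq jl jns t hjl (by omega) sched,
            ih (t - 1) _ (by omega),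
            PySem.List.pyRange_neg_one_cons (show (0 : Int) < t by omega)]
        simp only [List.flatMap_cons]
        rw [walkPairs_append, stepB_getLastD, List.append_assoc]
    · rw [genA_loop, if_neg h0, PySem.List.pyRange_neg_one_eq_nil (by omega)]
      simp [walkPairs]

-- ===== VERDICT (by name: the statement is the Claim_ definition above) =====
theorem generate_repaint_schedule_spec : Claim_equal_generate_repaint_schedule := by
  intro T jl jns _ hpre
  unfold Spec_generate_repaint_schedule generate_repaint_schedule generate_repaint_schedule_alt
  rw [genB_eq]
  by_cases hT : 1 ≤ T
  · have hjl : jl ≠ 0 := by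
      rcases hpre with h | h
      · exact h
      · omega
    have hfuel : T - 1 < (T.toNat : Int) := by omega
    rw [genA_main jl jns hjl T.toNat (T - 1) [] hfuel, if_pos hT]
    simp only [List.nil_append, List.cons_append, List.nil_append]
    rw [zip_drop_eq_walkPairs]
  · have : T.toNat = 0 := by omega
    rw [this, if_neg hT, PySem.List.pyRange_neg_one_eq_nil (by omega)]
    simp [genA_loop]
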